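-- pv_equiv track=rewrite | github.com/hyeok3011/algorithm | programmers/lv2/충돌위험찾기/python/solution.py | collision_count
-- ===== SOURCE A (Python) =====
-- def collision_count(positions):
--     if len(positions) == 0:
--         return
--     position_counts = {}
--     for pos in positions:
--         position_counts[pos] = position_counts.get(pos, 0) + 1
--     collisions = 0
--
--     for count in position_counts.values():
--         if count > 1:
--             collisions += 1
--     return collisions
-- ===== SOURCE B (Python) =====
-- def collision_count(positions):
--     if len(positions) == 0:
--         return
--     collisions = 0
--     prev = None
--     run = 0
--     for pos in sorted(positions):
--         if pos == prev:
--             run += 1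
--         else:
--             if run > 1:
--                 collisions += 1
--             prev = pos
--             run = 1
--     if run > 1:
--         collisions += 1
--     return collisions
-- ===== Notes on version B (the rewrite author's own statement) =====
-- stated objective: alternative
-- what changed: Replaces A's hash-counter (build a dict of counts, then scan its values for counts > 1) by sort-then-scan: sort the positions and walk the sorted list tracking maximal runs of equal adjacent values, counting each run of length > 1 once.
-- outside the precondition, e.g. on collision_count([]): A returns None, B returns None
import Mathlib
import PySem

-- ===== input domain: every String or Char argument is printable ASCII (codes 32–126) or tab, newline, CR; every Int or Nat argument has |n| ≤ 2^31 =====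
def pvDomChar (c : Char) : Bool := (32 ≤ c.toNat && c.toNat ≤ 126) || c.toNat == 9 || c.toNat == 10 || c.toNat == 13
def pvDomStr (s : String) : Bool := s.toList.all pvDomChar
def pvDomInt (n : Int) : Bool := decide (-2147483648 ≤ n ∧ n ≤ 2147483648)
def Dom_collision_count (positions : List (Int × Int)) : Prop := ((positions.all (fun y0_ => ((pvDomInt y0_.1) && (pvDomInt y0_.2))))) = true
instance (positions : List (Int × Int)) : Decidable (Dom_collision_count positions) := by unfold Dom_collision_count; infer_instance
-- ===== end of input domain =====

-- B replaces A's hash-counter (dict of counts, then a scan of its values) by sort-then-scan: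
-- walk the sorted list and count each maximal run of equal adjacent values of length > 1 once
-- (objective: alternative; same result, different algorithm).
-- On the empty list Python A (and B) return None, not an int; that input is excluded by Pre_.

-- ===== PORT A =====
def collision_count (positions : List (Int × Int)) : Int :=
  if PySem.List.len positions = 0 then 0  -- Python A returns None here; outside Pre_
  else
    let position_counts : PySem.Dict (Int × Int) Int :=
      positions.foldl (fun d pos => d.insert pos (d.getD pos 0 + 1)) PySem.Dict.empty
    position_counts.values.foldl
      (fun collisions count => if count > 1 then collisions + 1 else collisions) 0

-- ===== PORT B =====
-- one iteration of B's loop over the sorted list; state = (collisions, prev, run)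
def bStep (st : Int × Option (Int × Int) × Int) (pos : Int × Int) :
    Int × Option (Int × Int) × Int :=
  if st.2.1 = some pos then (st.1, st.2.1, st.2.2 + 1)
  else ((if st.2.2 > 1 then st.1 + 1 else st.1), some pos, 1)

def collision_count_alt (positions : List (Int × Int)) : Int :=
  if PySem.List.len positions = 0 then 0  -- Python B returns None here; outside Pre_
  else
    let final := (PySem.List.sorted2 positions Prod.fst Prod.snd).foldl bStep (0, none, 0)
    if final.2.2 > 1 then final.1 + 1 else final.1

-- ===== PRECONDITION & SPEC =====
-- Pre_ excludes only the empty list, on which Python A (and B) return None instead of an int.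
def Pre_collision_count (positions : List (Int × Int)) : Prop := positions ≠ []
instance (positions : List (Int × Int)) : Decidable (Pre_collision_count positions) := by
  unfold Pre_collision_count; infer_instance
def pvWitness_collision_count : (List (Int × Int)) := [((0 : Int), (0 : Int))]
def Spec_collision_count (positions : List (Int × Int)) (out : Int) : Prop := out = collision_count_alt positions
instance (positions : List (Int × Int)) (out : Int) : Decidable (Spec_collision_count positions out) := by unfold Spec_collision_count; infer_instance

-- ===== CLAIM (what is proved, stated in full; the proofs are below) =====
def Claim_equal_collision_count : Prop := ∀ (positions : List (Int × Int)), Dom_collision_count positions → Pre_collision_count positions → Spec_collision_count positions (collision_count positions)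

-- ===== LEMMAS AND PROOFS =====

-- the comparison sorted2 sorts by (Python's lexicographic order on int pairs)
def lexLt (a b : Int × Int) : Bool :=
  decide (a.1 < b.1) || (!decide (b.1 < a.1) && decide (a.2 < b.2))

theorem lexLt_asymm (a b : Int × Int) (h : lexLt a b = true) : lexLt b a = false := by
  rcases a with ⟨a1, a2⟩; rcases b with ⟨b1, b2⟩
  simp [lexLt] at h ⊢; omega

theorem lexLt_trans (a b c : Int × Int) (h1 : lexLt a b = true) (h2 : lexLt b c = true) :
    lexLt a c = true := by
  rcases a with ⟨a1, a2⟩; rcases b with ⟨b1, b2⟩; rcases c with ⟨c1, c2⟩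
  simp [lexLt] at h1 h2 ⊢; omega

theorem lexLt_conn (a b : Int × Int) (h1 : lexLt a b = false) (h2 : lexLt b a = false) :
    a = b := by
  rcases a with ⟨a1, a2⟩; rcases b with ⟨b1, b2⟩
  simp [lexLt] at h1 h2; simp [Prod.ext_iff]; omega

-- insertion keeps the "each later element is not lexLt-below an earlier one" invariant
theorem insertBy_pairwise (x : Int × Int) :
    ∀ acc : List (Int × Int), acc.Pairwise (fun a b => lexLt b a = false) →
      (PySem.List.insertBy lexLt x acc).Pairwise (fun a b => lexLt b a = false) := by
  intro acc
  induction acc with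
  | nil => intro _; simp [PySem.List.insertBy]
  | cons y ys ih =>
    intro h
    rw [List.pairwise_cons] at h
    by_cases hxy : lexLt x y = true
    · rw [show PySem.List.insertBy lexLt x (y :: ys) = x :: y :: ys by
        simp [PySem.List.insertBy, hxy]]
      refine List.pairwise_cons.2 ⟨?_, List.pairwise_cons.2 ⟨h.1, h.2⟩⟩
      intro z hz
      rcases List.mem_cons.1 hz with rfl | hz'
      · exact lexLt_asymm _ _ hxy
      · by_contra hc
        have hzx : lexLt z x = true := by
          cases hzc : lexLt z x with
          | true => rfl
          | false => exact absurd hzc hc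
        have := lexLt_trans z x y hzx hxy
        rw [h.1 z hz'] at this; exact Bool.false_ne_true this
    · rw [show PySem.List.insertBy lexLt x (y :: ys) = y :: PySem.List.insertBy lexLt x ys by
        simp [PySem.List.insertBy, hxy]]
      refine List.pairwise_cons.2 ⟨?_, ih h.2⟩
      intro z hz
      rcases (PySem.List.mem_insertBy lexLt x z ys).1 hz with rfl | hz'
      · rw [Bool.not_eq_true] at hxy; exact hxy
      · exact h.1 z hz'

theorem foldl_insertBy_pairwise (xs : List (Int × Int)) :
    ∀ acc : List (Int × Int), acc.Pairwise (fun a b => lexLt b a = false) →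
      (xs.foldl (fun acc x => PySem.List.insertBy lexLt x acc) acc).Pairwise
        (fun a b => lexLt b a = false) := by
  induction xs with
  | nil => intro acc h; simpa using h
  | cons x xs ih => intro acc h; exact ih _ (insertBy_pairwise x acc h)

theorem sorted2_eq_foldl (positions : List (Int × Int)) :
    PySem.List.sorted2 positions Prod.fst Prod.snd =
      positions.foldl (fun acc x => PySem.List.insertBy lexLt x acc) [] := rfl

theorem sorted2_pairwise (positions : List (Int × Int)) :
    (PySem.List.sorted2 positions Prod.fst Prod.snd).Pairwise
      (fun a b => lexLt b a = false) := by
  rw [sorted2_eq_foldl]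
  exact foldl_insertBy_pairwise positions [] (by simp)

-- number of distinct values occurring at least twice, by peeling one value at a time
def dupCount : List (Int × Int) → Int
  | [] => 0
  | x :: xs =>
      (if 2 ≤ 1 + xs.count x then 1 else 0) + dupCount (xs.filter (fun z => z != x))
termination_by l => l.length
decreasing_by
  simp only [List.length_unattach, List.length_cons]
  exact Nat.lt_succ_of_le (le_trans (List.length_filter_le _ _) (by simp))

theorem dupCount_nil : dupCount [] = 0 := by simp [dupCount]

theorem dupCount_cons (x : Int × Int) (xs : List (Int × Int)) :
    dupCount (x :: xs)
      = (if 2 ≤ 1 + xs.count x then 1 else 0) + dupCount (xs.filter (fun z => z != x)) := by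
  rw [dupCount]

theorem unattach_filter_ne (xs : List (Int × Int)) (x : Int × Int) :
    (List.filter (fun x_1 : {z // z ∈ xs} => match x_1 with | ⟨z, _⟩ => z != x) xs.attach).unattach
      = xs.filter (fun z => z != x) := by
  show (List.filter ((fun z => z != x) ∘ Subtype.val) xs.attach).map Subtype.val = _
  rw [List.map_filter, List.attach_map_subtype_val]
  · apply List.filter_congr
    intro a ha
    by_cases h : a = x <;> simp [ha, bne, h]
  · exact Subtype.val_injective

-- any duplicate-free enumeration s of the values of zs counts the duplicated values of zs
theorem countP_eq_dupCount (zs : List (Int × Int)) :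
    ∀ s : List (Int × Int), s.Nodup → (∀ y, y ∈ s ↔ y ∈ zs) →
      ((s.countP (fun k => decide (2 ≤ zs.count k)) : Int) = dupCount zs) := by
  induction zs using dupCount.induct with
  | case1 =>
    intro s hnd hm
    have hs : s = [] := List.eq_nil_iff_forall_not_mem.2 (fun y hy => by simp [hm y] at hy)
    simp [hs, dupCount_nil]
  | case2 x xs ih =>
    simp only [unattach_filter_ne] at ih
    intro s hnd hm
    have hxs : x ∈ s := (hm x).2 (by simp)
    have hperm : s.Perm (x :: s.erase x) := List.perm_cons_erase hxs
    rw [hperm.countP_eq, List.countP_cons]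
    have hce : s.erase x = s.filter (fun z => z != x) :=
      List.Nodup.erase_eq_filter hnd x
    have hmem : ∀ y, y ∈ s.erase x ↔ y ∈ xs.filter (fun z => z != x) := by
      intro y
      rw [hce]
      simp only [List.mem_filter, hm y, List.mem_cons, bne_iff_ne]
      constructor
      · rintro ⟨rfl | hy, hne⟩
        · exact absurd rfl hne
        · exact ⟨hy, hne⟩
      · rintro ⟨hy, hne⟩; exact ⟨Or.inr hy, hne⟩
    have hcongr : (s.erase x).countP (fun k => decide (2 ≤ (x :: xs).count k))
        = (s.erase x).countP (fun k => decide (2 ≤ (xs.filter (fun z => z != x)).count k)) := by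
      apply List.countP_congr
      intro k hk
      have hkne : k ≠ x := by
        rw [hce] at hk; simpa using (List.mem_filter.1 hk).2
      have h1 : (x :: xs).count k = xs.count k := List.count_cons_of_ne hkne.symm
      have h2 : (xs.filter (fun z => z != x)).count k = xs.count k := by
        rw [List.count_filter]; simp [hkne]
      rw [h1, h2]
    rw [hcongr]
    have hrec := ih (s.erase x) (hnd.erase x) hmem
    rw [dupCount_cons]
    have hcx : (x :: xs).count x = 1 + xs.count x := by
      rw [List.count_cons_self]; omega
    rw [hcx]
    push_cast
    rw [hrec]
    simp only [decide_eq_true_eq]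
    generalize dupCount (xs.filter (fun z => z != x)) = d
    split_ifs <;> omega

-- the A side: the counter loop counts the distinct duplicated values
theorem a_eq_dupCount (positions : List (Int × Int)) (h : positions ≠ []) :
    collision_count positions = dupCount positions := by
  have h0 : ¬(PySem.List.len positions = 0) := by simp [PySem.List.len_eq, h]
  unfold collision_count
  rw [if_neg h0]
  dsimp only
  rw [PySem.Dict.foldl_insert_getD_add_one_eq_counter]
  have hval : (PySem.Dict.counter positions).values
      = (PySem.Set.ofList positions).map (fun k => ((positions.count k : Int))) := by
    simp only [PySem.Dict.values, PySem.Dict.items_counter]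
    simp [List.map_map, Function.comp]
  rw [hval]
  have := PySem.List.foldl_if_add_one (p := fun c : Int => decide (1 < c))
    (l := (PySem.Set.ofList positions).map (fun k => ((positions.count k : Int)))) (a := 0)
  simp only [gt_iff_lt] at this ⊢
  simp only [decide_eq_true_eq] at this
  rw [this, List.countP_map, zero_add]
  have hcongr : (PySem.Set.ofList positions).countP
        ((fun c : Int => decide (1 < c)) ∘ fun k => ((positions.count k : Int)))
      = (PySem.Set.ofList positions).countP (fun k => decide (2 ≤ positions.count k)) := by
    apply List.countP_congr
    intro k _
    have h12 : (1 < ((positions.count k : Int))) ↔ (2 ≤ positions.count k) := by omega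
    simp [h12]
  rw [hcongr]
  exact countP_eq_dupCount positions (PySem.Set.ofList positions)
    (PySem.Set.nodup_ofList positions) (fun y => PySem.Set.mem_ofList positions y)

-- dupCount only depends on the multiset of values
theorem dupCount_perm (zs zs' : List (Int × Int)) (h : zs.Perm zs') :
    dupCount zs = dupCount zs' := by
  have hs := PySem.Set.nodup_ofList zs
  have hm : ∀ y, y ∈ PySem.Set.ofList zs ↔ y ∈ zs := fun y => PySem.Set.mem_ofList zs y
  have hm' : ∀ y, y ∈ PySem.Set.ofList zs ↔ y ∈ zs' := fun y => (hm y).trans h.mem_iff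
  rw [← countP_eq_dupCount zs _ hs hm, ← countP_eq_dupCount zs' _ hs hm']
  congr 1
  apply List.countP_congr
  intro k _
  rw [h.count_eq]

-- the run-scanning loop, started inside a run of x of current length j, adds one per
-- duplicated value among {x (total multiplicity j + count), values of the tail}
theorem run_loop (ys : List (Int × Int)) :
    ∀ (_hpw : ys.Pairwise (fun a b => lexLt b a = false)) (c : Int) (x : Int × Int) (j : Int),
      1 ≤ j → (∀ z ∈ ys, lexLt z x = false) →
      ((fun f : Int × Option (Int × Int) × Int => if f.2.2 > 1 then f.1 + 1 else f.1)
          (ys.foldl bStep (c, some x, j)))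
        = c + (if 2 ≤ j + (ys.count x : Int) then 1 else 0)
            + dupCount (ys.filter (fun z => z != x)) := by
  induction ys with
  | nil =>
    intro _ c x j hj _
    simp only [List.foldl_nil, List.filter_nil, List.count_nil, dupCount_nil]
    push_cast
    split_ifs <;> omega
  | cons y ys ih =>
    intro hpw c x j hj hup
    rw [List.pairwise_cons] at hpw
    by_cases hxy : x = y
    · subst hxy
      have hstep : bStep (c, some x, j) x = (c, some x, j + 1) := by simp [bStep]
      rw [List.foldl_cons, hstep, ih hpw.2 c x (j + 1) (by omega) hpw.1]
      have hf : (x :: ys).filter (fun z => z != x) = ys.filter (fun z => z != x) := by simp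
      have hc : ((x :: ys).count x : Int) = 1 + (ys.count x : Int) := by
        rw [List.count_cons_self]; push_cast; ring
      rw [hf, hc]
      generalize dupCount (ys.filter (fun z => z != x)) = d
      split_ifs <;> omega
    · have hstep : bStep (c, some x, j) y
          = ((if j > 1 then c + 1 else c), some y, 1) := by
        simp [bStep, hxy]
      have hxnot : x ∉ y :: ys := by
        intro hmem
        rcases List.mem_cons.1 hmem with rfl | hmem'
        · exact hxy rfl
        · have h1 : lexLt x y = false := hpw.1 x hmem'
          have h2 : lexLt y x = false := hup y (by simp)
          exact hxy (lexLt_conn y x h2 h1).symm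
      have hxny : x ∉ ys := fun hh => hxnot (List.mem_cons_of_mem _ hh)
      rw [List.foldl_cons, hstep,
        ih hpw.2 (if j > 1 then c + 1 else c) y 1 (by omega) hpw.1]
      have hcnt : (y :: ys).count x = 0 := List.count_eq_zero.2 hxnot
      have hfil : (y :: ys).filter (fun z => z != x) = y :: ys := by
        rw [List.filter_eq_self]
        intro z hz
        simp only [bne_iff_ne]
        intro hzx; exact hxnot (hzx ▸ hz)
      rw [hcnt, hfil, dupCount_cons]
      push_cast
      generalize dupCount (ys.filter (fun z => z != y)) = d
      split_ifs <;> omega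

-- the B side equals dupCount of the sorted list
theorem b_eq_dupCount (positions : List (Int × Int)) (h : positions ≠ []) :
    collision_count_alt positions
      = dupCount (PySem.List.sorted2 positions Prod.fst Prod.snd) := by
  have h0 : ¬(PySem.List.len positions = 0) := by simp [PySem.List.len_eq, h]
  unfold collision_count_alt
  rw [if_neg h0]
  dsimp only
  have hpw := sorted2_pairwise positions
  rcases hys : PySem.List.sorted2 positions Prod.fst Prod.snd with _ | ⟨y, ys⟩
  · exfalso
    have := (PySem.List.sorted2_perm positions Prod.fst Prod.snd false).length_eq
    rw [hys] at this
    exact h (List.eq_nil_of_length_eq_zero this.symm)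
  · rw [hys] at hpw
    rw [List.pairwise_cons] at hpw
    have hstep : bStep (0, none, 0) y = (0, some y, 1) := by simp [bStep]
    rw [List.foldl_cons, hstep]
    have := run_loop ys hpw.2 0 y 1 (by omega) hpw.1
    simp only at this
    rw [this, dupCount_cons]
    generalize dupCount (ys.filter (fun z => z != y)) = d
    split_ifs <;> omega

theorem both_eq (positions : List (Int × Int)) (h : positions ≠ []) :
    collision_count positions = collision_count_alt positions := by
  rw [a_eq_dupCount positions h, b_eq_dupCount positions h]
  exact dupCount_perm _ _
    (PySem.List.sorted2_perm positions Prod.fst Prod.snd false).symm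

-- ===== VERDICT (by name: the statement is the Claim_ definition above) =====
theorem collision_count_spec : Claim_equal_collision_count := by
  intro positions _ hpre
  unfold Spec_collision_count
  exact both_eq positions hpre
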